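-- pv_equiv track=rewrite | github.com/ktawiah/CodePath-DSA | Unit-3/Advanced_V1/reveal_by_priority.py | arrange_attendees_by_priority
-- ===== SOURCE A (Python) =====
-- def arrange_attendees_by_priority(attendees, priority):
--     # Create three lists to store priorities
--     less, middle, greater = [], [], []
--
--     # Iterate through attendees list
--     for attendee in attendees:
--
--         # Update either lists based on priority
--         if attendee < priority:
--             less.append(attendee)
--         elif attendee == priority:
--             middle.append(attendee)
--         else:
--             greater.append(attendee)
--
--     # Return concatenated list
--     return less + middle + greater
-- ===== SOURCE B (Python) =====
-- def arrange_attendees_by_priority(attendees, priority):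
--     # Single stable sort on the bucket index; Timsort stability keeps input order within each bucket.
--     return sorted(attendees, key=lambda a: 0 if a < priority else (1 if a == priority else 2))
-- ===== Notes on version B (the rewrite author's own statement) =====
-- stated objective: idiomatic
-- what changed: Replaced the three explicit accumulator lists and their concatenation by a single stable sort keyed on the bucket index (0/1/2), relying on sort stability for the within-bucket order.
import Mathlib
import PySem

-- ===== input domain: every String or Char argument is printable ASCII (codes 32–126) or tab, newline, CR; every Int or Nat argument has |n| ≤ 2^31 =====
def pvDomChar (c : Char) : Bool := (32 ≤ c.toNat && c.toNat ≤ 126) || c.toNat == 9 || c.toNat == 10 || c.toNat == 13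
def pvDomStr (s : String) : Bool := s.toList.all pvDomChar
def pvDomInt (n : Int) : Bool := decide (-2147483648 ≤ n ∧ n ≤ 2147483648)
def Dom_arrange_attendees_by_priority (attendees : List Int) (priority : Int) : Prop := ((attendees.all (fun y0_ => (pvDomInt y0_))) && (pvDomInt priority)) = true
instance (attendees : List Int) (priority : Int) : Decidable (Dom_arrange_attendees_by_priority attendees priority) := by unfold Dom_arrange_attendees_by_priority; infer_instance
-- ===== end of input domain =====

-- B replaces the three accumulator lists with one stable sort keyed on the bucket index (idiomatic, not faster).

-- ===== PORT A =====
def arrange_attendees_by_priority (attendees : List Int) (priority : Int) : List Int :=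
  -- less, middle, greater = [], [], []; for attendee in attendees: append to one of them
  let r := attendees.foldl
    (fun (acc : List Int × List Int × List Int) attendee =>
      if attendee < priority then (acc.1 ++ [attendee], acc.2.1, acc.2.2)
      else if attendee = priority then (acc.1, acc.2.1 ++ [attendee], acc.2.2)
      else (acc.1, acc.2.1, acc.2.2 ++ [attendee]))
    ([], [], [])
  r.1 ++ r.2.1 ++ r.2.2

-- ===== PORT B =====
def arrange_attendees_by_priority_alt (attendees : List Int) (priority : Int) : List Int :=
  PySem.List.sorted attendees
    (fun a => if a < priority then (0 : Int) else if a = priority then 1 else 2)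

-- ===== PRECONDITION & SPEC =====
def Spec_arrange_attendees_by_priority (attendees : List Int) (priority : Int) (out : List Int) : Prop := out = arrange_attendees_by_priority_alt attendees priority
instance (attendees : List Int) (priority : Int) (out : List Int) : Decidable (Spec_arrange_attendees_by_priority attendees priority out) := by unfold Spec_arrange_attendees_by_priority; infer_instance

-- ===== CLAIM (what is proved, stated in full; the proofs are below) =====
def Claim_equal_arrange_attendees_by_priority : Prop := ∀ (attendees : List Int) (priority : Int), Dom_arrange_attendees_by_priority attendees priority → Spec_arrange_attendees_by_priority attendees priority (arrange_attendees_by_priority attendees priority)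

-- ===== LEMMAS AND PROOFS =====

lemma ins_append {α : Type} (bef : α → α → Bool) (x : α) (as bs : List α)
    (h : ∀ y ∈ as, bef x y = false) :
    PySem.List.insertBy bef x (as ++ bs) = as ++ PySem.List.insertBy bef x bs := by
  induction as with
  | nil => simp
  | cons a t ih =>
    simp only [List.cons_append, PySem.List.insertBy, h a (by simp)]
    simp [ih (fun y hy => h y (by simp [hy]))]

lemma ins_front {α : Type} (bef : α → α → Bool) (x : α) (bs : List α)
    (h : ∀ y ∈ bs, bef x y = true) :
    PySem.List.insertBy bef x bs = x :: bs := by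
  cases bs with
  | nil => rfl
  | cons b t => simp [PySem.List.insertBy, h b (by simp)]

lemma key_lt0 (p y : Int) (h : y < p) :
    (if y < p then (0 : Int) else if y = p then 1 else 2) = 0 := if_pos h

lemma key_eq1 (p y : Int) (h : y = p) :
    (if y < p then (0 : Int) else if y = p then 1 else 2) = 1 := by
  rw [if_neg (by omega), if_pos h]

lemma key_gt2 (p y : Int) (h : p < y) :
    (if y < p then (0 : Int) else if y = p then 1 else 2) = 2 := by
  rw [if_neg (by omega), if_neg (by omega)]

lemma sorted_three (p : Int) (xs : List Int) :
    PySem.List.sorted xs (fun a => if a < p then (0 : Int) else if a = p then 1 else 2) =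
      xs.filter (fun y => decide (y < p)) ++ xs.filter (fun y => decide (y = p)) ++
        xs.filter (fun y => decide (p < y)) := by
  rw [PySem.List.sorted_eq_foldl_insertBy]
  induction xs using List.reverseRecOn with
  | nil => rfl
  | append_singleton t x ih =>
    rw [List.foldl_append, List.foldl_cons, List.foldl_nil, ih]
    set bef : Int -> Int -> Bool := fun a b =>
      decide ((if a < p then (0 : Int) else if a = p then 1 else 2) <
              (if b < p then (0 : Int) else if b = p then 1 else 2)) with hbef
    set f0 := t.filter (fun y => decide (y < p)) with hf0
    set f1 := t.filter (fun y => decide (y = p)) with hf1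
    set f2 := t.filter (fun y => decide (p < y)) with hf2
    have m0 : forall y, y ∈ f0 -> y < p := by
      intro y hy; simpa using (List.of_mem_filter hy)
    have m1 : forall y, y ∈ f1 -> y = p := by
      intro y hy; simpa using (List.of_mem_filter hy)
    have m2 : forall y, y ∈ f2 -> p < y := by
      intro y hy; simpa using (List.of_mem_filter hy)
    rcases lt_trichotomy x p with hx | hx | hx
    · have e0 : (t ++ [x]).filter (fun y => decide (y < p)) = f0 ++ [x] := by
        simp [hf0, hx]
      have e1 : (t ++ [x]).filter (fun y => decide (y = p)) = f1 := by
        simp [hf1, show ¬ x = p by omega]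
      have e2 : (t ++ [x]).filter (fun y => decide (p < y)) = f2 := by
        simp [hf2, show ¬ p < x by omega]
      rw [e0, e1, e2, List.append_assoc f0 f1 f2]
      rw [ins_append bef x f0 (f1 ++ f2) (by
        intro y hy
        simp only [hbef, key_lt0 p x hx, key_lt0 p y (m0 y hy)]
        decide)]
      rw [ins_front bef x (f1 ++ f2) (by
        intro y hy
        rcases List.mem_append.mp hy with hy1 | hy2
        · simp only [hbef, key_lt0 p x hx, key_eq1 p y (m1 y hy1)]; decide
        · simp only [hbef, key_lt0 p x hx, key_gt2 p y (m2 y hy2)]; decide)]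
      simp
    · have e0 : (t ++ [x]).filter (fun y => decide (y < p)) = f0 := by
        simp [hf0, show ¬ x < p by omega]
      have e1 : (t ++ [x]).filter (fun y => decide (y = p)) = f1 ++ [x] := by
        simp [hf1, hx]
      have e2 : (t ++ [x]).filter (fun y => decide (p < y)) = f2 := by
        simp [hf2, show ¬ p < x by omega]
      rw [e0, e1, e2]
      rw [ins_append bef x (f0 ++ f1) f2 (by
        intro y hy
        rcases List.mem_append.mp hy with hy1 | hy2
        · simp only [hbef, key_eq1 p x hx, key_lt0 p y (m0 y hy1)]; decide
        · simp only [hbef, key_eq1 p x hx, key_eq1 p y (m1 y hy2)]; decide)]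
      rw [ins_front bef x f2 (by
        intro y hy
        simp only [hbef, key_eq1 p x hx, key_gt2 p y (m2 y hy)]; decide)]
      simp
    · have e0 : (t ++ [x]).filter (fun y => decide (y < p)) = f0 := by
        simp [hf0, show ¬ x < p by omega]
      have e1 : (t ++ [x]).filter (fun y => decide (y = p)) = f1 := by
        simp [hf1, show ¬ x = p by omega]
      have e2 : (t ++ [x]).filter (fun y => decide (p < y)) = f2 ++ [x] := by
        simp [hf2, hx]
      rw [e0, e1, e2]
      rw [PySem.List.insertBy_of_forall_not_before bef x (f0 ++ f1 ++ f2) (by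
        intro y hy
        rcases List.mem_append.mp hy with hy1 | hy2
        · rcases List.mem_append.mp hy1 with hy3 | hy4
          · simp only [hbef, key_gt2 p x hx, key_lt0 p y (m0 y hy3)]; decide
          · simp only [hbef, key_gt2 p x hx, key_eq1 p y (m1 y hy4)]; decide
        · simp only [hbef, key_gt2 p x hx, key_gt2 p y (m2 y hy2)]; decide)]
      simp

lemma loopA (p : Int) (xs : List Int) : forall (l m g : List Int),
    xs.foldl
      (fun (acc : List Int × List Int × List Int) attendee =>
        if attendee < p then (acc.1 ++ [attendee], acc.2.1, acc.2.2)
        else if attendee = p then (acc.1, acc.2.1 ++ [attendee], acc.2.2)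
        else (acc.1, acc.2.1, acc.2.2 ++ [attendee])) (l, m, g) =
      (l ++ xs.filter (fun y => decide (y < p)), m ++ xs.filter (fun y => decide (y = p)),
        g ++ xs.filter (fun y => decide (p < y))) := by
  induction xs with
  | nil => simp
  | cons x t ih =>
    intro l m g
    rw [List.foldl_cons]
    by_cases h1 : x < p
    · simp only [if_pos h1, ih, List.filter_cons]
      simp [h1, show ¬ x = p by omega, show ¬ p < x by omega]
    · by_cases h2 : x = p
      · simp only [if_neg h1, if_pos h2, ih, List.filter_cons]
        simp [h2]
      · simp only [if_neg h1, if_neg h2, ih, List.filter_cons]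
        simp [h1, h2, show p < x by omega]

-- ===== VERDICT (by name: the statement is the Claim_ definition above) =====
theorem arrange_attendees_by_priority_spec : Claim_equal_arrange_attendees_by_priority := by
  intro attendees priority _
  unfold Spec_arrange_attendees_by_priority arrange_attendees_by_priority arrange_attendees_by_priority_alt
  rw [loopA, sorted_three]
  simp
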